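-- pv_equiv track=rewrite | github.com/ewkimwaki/Python-challenge- | moringa Challenge/firstChallenge.py | solution
-- ===== SOURCE A (Python) =====
-- def solution(A):
--     n = len(A) #calaculates the number of items in the array
--     total_bricks = sum(A) #adds values of the items
--
--     #checks if it will be possible to perform our function of distributing equally
--     if total_bricks % n != 0:
--         return -1
--
--     overflow_bricks = total_bricks // n
--     moves = 0
--     for i in range(n):
--         to_be_removed = A[i] - overflow_bricks
--
--         if to_be_removed > 0:
--             A[i] -= to_be_removed
--             A[i + 1] += to_be_removed
--             moves += to_be_removed
--         elif to_be_removed < 0: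
--             A[i] -= to_be_removed
--             A[i + 1] += to_be_removed
--             moves -= to_be_removed
--
--     return moves
-- ===== SOURCE B (Python) =====
-- def solution(A):
--     # prefix-sum formulation: moves = sum of |prefix(i+1) - (i+1)*target|;
--     # mutates A to the balanced array on success, like the original.
--     n = len(A)
--     total = sum(A)
--     if total % n != 0:
--         return -1
--     target = total // n
--     moves = 0
--     prefix = 0
--     for i, x in enumerate(A):
--         prefix += x
--         moves += abs(prefix - (i + 1) * target)
--     A[:] = [target] * n
--     return moves
-- ===== Notes on version B (the rewrite author's own statement) =====
-- stated objective: alternative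
-- what changed: Replaces the in-place carry-and-shift loop over A[i]/A[i+1] with a single prefix-sum pass accumulating |prefix(i+1) - (i+1)*target| (then sets A[:] = [target]*n to reproduce A's in-place balancing side effect).
import Mathlib
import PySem

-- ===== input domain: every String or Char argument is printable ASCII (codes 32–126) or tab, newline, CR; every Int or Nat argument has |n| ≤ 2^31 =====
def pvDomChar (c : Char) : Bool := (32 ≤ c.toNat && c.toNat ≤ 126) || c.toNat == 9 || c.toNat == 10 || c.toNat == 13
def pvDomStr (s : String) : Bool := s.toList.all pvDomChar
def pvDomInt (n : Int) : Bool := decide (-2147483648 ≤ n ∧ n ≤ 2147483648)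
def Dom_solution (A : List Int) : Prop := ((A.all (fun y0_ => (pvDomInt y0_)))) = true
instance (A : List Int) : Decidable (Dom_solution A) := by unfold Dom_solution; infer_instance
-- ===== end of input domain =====

-- B replaces A's in-place carry-and-shift loop by a prefix-sum pass; equivalence is about the
-- RETURN value only (Python A mutates its argument to the balanced array; Python B performs the
-- same mutation via A[:] = [target]*n).

-- ===== PORT A =====
-- One loop step of A: reads A[i], shifts the surplus/deficit to A[i+1], counts the moves.
-- getD/set are exact on every step Python reaches: i < n always, and the i+1 access happens
-- only when to_be_removed ≠ 0, which never holds at i = n-1 under the divisibility guard.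
def stepA (ov : Int) (s : List Int × Int) (i : Nat) : List Int × Int :=
  let t := s.1.getD i 0 - ov
  if t > 0 then
    let l1 := s.1.set i (s.1.getD i 0 - t)
    (l1.set (i+1) (l1.getD (i+1) 0 + t), s.2 + t)
  else if t < 0 then
    let l1 := s.1.set i (s.1.getD i 0 - t)
    (l1.set (i+1) (l1.getD (i+1) 0 + t), s.2 - t)
  else s

def solution (A : List Int) : Int :=
  let n := A.length
  let total := A.sum
  if PySem.Int.mod total (n : Int) ≠ 0 then -1
  else
    let ov := PySem.Int.floordiv total (n : Int)
    ((List.range n).foldl (stepA ov) (A, 0)).2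

-- ===== PORT B =====
-- B's loop: running prefix sum, moves += |prefix - (i+1)*target|.
def altLoop (target : Int) : List Int → Nat → Int → Int → Int
  | [], _, _, moves => moves
  | x :: rest, i, pfx, moves =>
      altLoop target rest (i+1) (pfx + x) (moves + |pfx + x - ((i : Int) + 1) * target|)

def solution_alt (A : List Int) : Int :=
  let n := A.length
  let total := A.sum
  if PySem.Int.mod total (n : Int) ≠ 0 then -1
  else altLoop (PySem.Int.floordiv total (n : Int)) A 0 0 0

-- ===== PRECONDITION & SPEC =====
-- Pre_ excludes only the empty list, on which Python A raises ZeroDivisionError (total % 0).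
def Pre_solution (A : List Int) : Prop := A ≠ []
instance (A : List Int) : Decidable (Pre_solution A) := by unfold Pre_solution; infer_instance
def pvWitness_solution : List Int := ([1, 2, 3] : List Int)

def Spec_solution (A : List Int) (out : Int) : Prop := out = solution_alt A
instance (A : List Int) (out : Int) : Decidable (Spec_solution A out) := by unfold Spec_solution; infer_instance

-- ===== CLAIM (what is proved, stated in full; the proofs are below) =====
def Claim_equal_solution : Prop := ∀ (A : List Int), Dom_solution A → Pre_solution A → Spec_solution A (solution A)

-- ===== LEMMAS AND PROOFS =====

-- the common value both loops compute: Σ_{j<i} |prefix(j+1) - (j+1)*ov|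
def msum (A : List Int) (ov : Int) (i : Nat) : Int :=
  ((List.range i).map (fun j => |(A.take (j+1)).sum - ((j : Int) + 1) * ov|)).sum

lemma altLoop_eq (target : Int) (xs : List Int) (i : Nat) (pfx m : Int) :
    altLoop target xs i pfx m
      = m + ((List.range xs.length).map
          (fun j => |pfx + (xs.take (j+1)).sum - (((i + j : Nat) : Int) + 1) * target|)).sum := by
  induction xs generalizing i pfx m with
  | nil => simp [altLoop]
  | cons x rest ih =>
    rw [altLoop, ih]
    rw [List.length_cons, List.range_succ_eq_map, List.map_cons, List.map_map, List.sum_cons]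
    have htail : ((List.range rest.length).map
          (fun j => |pfx + x + (rest.take (j+1)).sum - (((i + 1 + j : Nat) : Int) + 1) * target|))
        = ((List.range rest.length).map
          ((fun j => |pfx + ((x :: rest).take (j+1)).sum - (((i + j : Nat) : Int) + 1) * target|)
            ∘ Nat.succ)) := by
      apply List.map_congr_left
      intro j hj
      simp only [Function.comp, List.take_succ_cons, List.sum_cons]
      congr 1
      push_cast
      ring
    rw [htail]
    simp only [List.take_succ_cons, List.take_zero, List.sum_cons, List.sum_nil, add_zero]
    ring

lemma replicate_append_getD (i : Nat) (ov y : Int) (rest : List Int) :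
    (List.replicate i ov ++ y :: rest).getD i 0 = y := by
  simp [List.getD]

lemma replicate_append_set (i : Nat) (ov y v : Int) (rest : List Int) :
    (List.replicate i ov ++ y :: rest).set i v = List.replicate i ov ++ v :: rest := by
  induction i with
  | zero => simp
  | succ k ih => simp [List.replicate_succ, ih]

lemma step2 (k : Nat) (ov t : Int) (rest : List Int) :
    (List.replicate k ov ++ ov :: rest).set (k+1)
        ((List.replicate k ov ++ ov :: rest).getD (k+1) 0 + t)
      = List.replicate (k+1) ov ++ rest.modifyHead (· + t) := by
  induction k with
  | zero => cases rest <;> simp [List.getD, List.modifyHead]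
  | succ n ih => simpa [List.replicate_succ, List.getD] using ih

lemma rep_shift (k : Nat) (ov : Int) (z : List Int) :
    List.replicate k ov ++ ov :: z = List.replicate (k+1) ov ++ z := by
  rw [List.replicate_succ']; simp

-- the invariant of A's loop
lemma stepA_inv (A : List Int) (ov : Int) (i : Nat) (hi : i ≤ A.length) :
    (List.range i).foldl (stepA ov) (A, 0)
      = (List.replicate i ov
           ++ ((A.drop i).modifyHead (· + ((A.take i).sum - (i : Int) * ov))),
         msum A ov i) := by
  induction i with
  | zero =>
    cases A <;> simp [msum]
  | succ k ih =>
    have hk : k < A.length := hi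
    rw [List.range_succ, List.foldl_append, ih (Nat.le_of_lt hk)]
    have hdrop : A.drop k = A[k] :: A.drop (k+1) := List.drop_eq_getElem_cons hk
    set c : Int := (A.take k).sum - (k : Int) * ov with hc
    have harr : (A.drop k).modifyHead (· + c) = (A[k] + c) :: A.drop (k+1) := by
      rw [hdrop]; rfl
    have hmsum : msum A ov (k+1) = msum A ov k + |A[k] + c - ov| := by
      simp only [msum, List.range_succ, List.map_append, List.sum_append, List.map_cons,
        List.map_nil, List.sum_cons, List.sum_nil, add_zero]
      congr 2
      rw [List.sum_take_succ A k hk, hc]; ring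
    have hc' : (A.take (k+1)).sum - ((k+1 : Nat) : Int) * ov = A[k] + c - ov := by
      rw [List.sum_take_succ A k hk, hc]; push_cast; ring
    rw [harr, hmsum, hc']
    simp only [List.foldl_cons, List.foldl_nil, stepA, replicate_append_getD]
    rcases lt_trichotomy (A[k] + c - ov) 0 with hneg | hzero | hpos
    · rw [if_neg (by omega), if_pos hneg, abs_of_neg hneg]
      rw [show A[k] + c - (A[k] + c - ov) = ov from by ring, replicate_append_set, step2]
      rw [Prod.mk.injEq]
      exact ⟨rfl, by ring⟩
    · rw [if_neg (by omega), if_neg (by omega)]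
      have hov : A[k] + c = ov := by omega
      rw [hov, rep_shift, Prod.mk.injEq]
      refine ⟨?_, by simp⟩
      congr 1
      cases A.drop (k+1) <;> simp [List.modifyHead]
    · rw [if_pos hpos, abs_of_pos hpos]
      rw [show A[k] + c - (A[k] + c - ov) = ov from by ring, replicate_append_set, step2]

-- ===== VERDICT (by name: the statement is the Claim_ definition above) =====
theorem solution_spec : Claim_equal_solution := by
  intro A _ hpre
  unfold Spec_solution solution solution_alt
  by_cases h : PySem.Int.mod A.sum (A.length : Int) ≠ 0
  · simp [h]
  · simp only [h, ite_false]
    rw [stepA_inv A _ A.length (le_refl _)]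
    rw [altLoop_eq]
    simp [msum]
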